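-- pv_equiv track=rewrite | github.com/JinbaeByeon/RiotAPI | 연습문제 풀이/test1.py | check
-- ===== SOURCE A (Python) =====
-- def check(str):
--     c = str[0]
--     case = 0 # 0일 경우 D나 E, 1일 경우 F, 2일 경우 F또는 G 또는 D,E
--     for i in range(1,len(str)+1):
--         if case == 0:
--             if c!= 'D' and c != 'E':
--                 return "NO"
--             elif i!= len(str):
--                 c=str[i]
--                 case =1
--             else:
--                 return "NO"
--         elif case ==1:
--             if c!='F':
--                 return "NO"
--             elif i!= len(str):
--                 c=str[i]
--                 case =2
--             else:
--                 return "NO"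
--         elif case ==2:
--             if c== 'G' and i == len(str):
--                 return "Yes"
--             elif (c== 'D' or c== 'E') and i != len(str):
--                 c=str[i]
--                 case = 1
--             elif c=='F'and i != len(str):
--                 c=str[i]
--                 case =2
--             else:
--                 return "NO"
-- ===== SOURCE B (Python) =====
-- def check(str):
--     # single-pass local-shape check instead of A's three-state machine
--     if str[0] not in 'DE':
--         return "NO"
--     if str[-1] != 'G':
--         return "NO"
--     body = str[:-1]
--     for i in range(len(body)):
--         ch = body[i]
--         if ch == 'F':
--             continue
--         if ch in 'DE' and i + 1 < len(body) and body[i + 1] == 'F':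
--             continue
--         return "NO"
--     return "Yes"
-- ===== Notes on version B (the rewrite author's own statement) =====
-- stated objective: alternative
-- what changed: Replaces A's explicit three-state machine (state variable, char register, index loop) with a single-pass local-shape check: first char in 'DE', last char 'G', and every char of the body is 'F' or a 'D'/'E' immediately followed by 'F'.
import Mathlib
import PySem

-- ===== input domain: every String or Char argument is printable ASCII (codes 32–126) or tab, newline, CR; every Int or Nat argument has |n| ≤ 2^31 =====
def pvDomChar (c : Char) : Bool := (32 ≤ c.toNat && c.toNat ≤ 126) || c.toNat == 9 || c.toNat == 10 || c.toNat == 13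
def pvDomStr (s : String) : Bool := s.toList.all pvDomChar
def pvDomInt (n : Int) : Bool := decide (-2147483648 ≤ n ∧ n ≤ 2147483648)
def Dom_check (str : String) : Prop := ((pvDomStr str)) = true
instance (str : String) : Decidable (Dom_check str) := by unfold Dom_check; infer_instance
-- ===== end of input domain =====

-- B replaces A's three-state machine with a one-pass local-shape check (first char D/E,
-- last char G, every body char is F or a D/E immediately followed by F); same cost.

-- ===== PORT A =====
-- A's for-loop over i = 1..len with state (c, case): iteration i sees the yet-unread
-- suffix str[i:] as `rest`; `i == len(str)` ↔ rest = []. Each step consumes one char.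
def checkGo : List Char → Char → Int → String
  | rest, c, cas =>
    if cas = 0 then
      if c ≠ 'D' ∧ c ≠ 'E' then "NO"
      else match rest with
        | c' :: r => checkGo r c' 1
        | [] => "NO"
    else if cas = 1 then
      if c ≠ 'F' then "NO"
      else match rest with
        | c' :: r => checkGo r c' 2
        | [] => "NO"
    else
      if c = 'G' ∧ rest = [] then "Yes"
      else if (c = 'D' ∨ c = 'E') ∧ rest ≠ [] then
        match rest with
        | c' :: r => checkGo r c' 1
        | [] => "NO"
      else if c = 'F' ∧ rest ≠ [] then
        match rest with
        | c' :: r => checkGo r c' 2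
        | [] => "NO"
      else "NO"

def check (str : String) : String :=
  match str.toList with
  | [] => "NO"          -- unreachable under Pre_check: Python A raises IndexError on ""
  | c :: rest => checkGo rest c 0

-- ===== PORT B =====
-- Source B's index loop over `body` with one-char lookahead, as structural recursion.
def altLoop : List Char → Bool
  | [] => true
  | c :: rest =>
    (c = 'F' || ((c = 'D' || c = 'E') && (match rest with | c' :: _ => c' = 'F' | [] => false)))
      && altLoop rest

def check_alt (str : String) : String :=
  match str.toList with
  | [] => "NO"          -- unreachable under Pre_check: Python B raises IndexError on ""
  | c :: rest =>
    if ¬(c = 'D' ∨ c = 'E') then "NO"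
    else if (c :: rest).getLast? ≠ some 'G' then "NO"
    else if altLoop (c :: rest).dropLast then "Yes" else "NO"

-- ===== PRECONDITION & SPEC =====
-- Pre_ excludes only the empty string, on which both A and B raise IndexError at str[0].
def Pre_check (str : String) : Prop := str ≠ ""
instance (str : String) : Decidable (Pre_check str) := by unfold Pre_check; infer_instance
def pvWitness_check : String := "DFG"

def Spec_check (str : String) (out : String) : Prop := out = check_alt str
instance (str : String) (out : String) : Decidable (Spec_check str out) := by unfold Spec_check; infer_instance

-- ===== CLAIM (what is proved, stated in full; the proofs are below) =====
def Claim_equal_check : Prop := ∀ (str : String), Dom_check str → Pre_check str → Spec_check str (check str)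

-- ===== LEMMAS AND PROOFS =====

-- B's verdict on the whole string, as a Bool
def altG (w : List Char) : Bool := altLoop w.dropLast && (w.getLast? == some 'G')

def yn (b : Bool) : String := if b then "Yes" else "NO"

-- equation lemmas for the port of A, one per (state, shape)
lemma checkGo0_nil (c : Char) : checkGo [] c 0 = "NO" := by
  by_cases hD : c = 'D' <;> by_cases hE : c = 'E' <;> simp [checkGo, hD, hE]

lemma checkGo0_cons (c c' : Char) (r : List Char) :
    checkGo (c' :: r) c 0 = if c = 'D' ∨ c = 'E' then checkGo r c' 1 else "NO" := by
  by_cases hD : c = 'D' <;> by_cases hE : c = 'E' <;> simp [checkGo, hD, hE]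

lemma checkGo1_nil (c : Char) : checkGo [] c 1 = "NO" := by
  by_cases h : c = 'F' <;> simp [checkGo, h]

lemma checkGo1_cons (c c' : Char) (r : List Char) :
    checkGo (c' :: r) c 1 = if c = 'F' then checkGo r c' 2 else "NO" := by
  by_cases h : c = 'F' <;> simp [checkGo, h]

lemma checkGo2_nil (c : Char) : checkGo [] c 2 = if c = 'G' then "Yes" else "NO" := by
  by_cases h : c = 'G' <;> simp [checkGo, h]

lemma checkGo2_DE (c c' : Char) (r : List Char) (h : c = 'D' ∨ c = 'E') :
    checkGo (c' :: r) c 2 = checkGo r c' 1 := by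
  rcases h with h | h <;> subst h <;> simp [checkGo]

lemma checkGo2_F (c' : Char) (r : List Char) :
    checkGo (c' :: r) 'F' 2 = checkGo r c' 2 := by
  simp [checkGo]

lemma checkGo2_bad (c c' : Char) (r : List Char)
    (hD : c ≠ 'D') (hE : c ≠ 'E') (hF : c ≠ 'F') :
    checkGo (c' :: r) c 2 = "NO" := by
  simp [checkGo, hD, hE, hF]

-- facts about B's predicate
lemma altG_single (c : Char) : altG [c] = (c == 'G') := by
  simp [altG, altLoop]

lemma altG_cons_F (r : List Char) : altG ('F' :: r) = altG r := by
  cases r with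
  | nil => simp [altG, altLoop]
  | cons d s => simp [altG, altLoop, List.dropLast]

lemma altG_cons_DE (c c' : Char) (r : List Char) (h : c = 'D' ∨ c = 'E') :
    altG (c :: c' :: r) = ((c' == 'F') && altG (c' :: r)) := by
  rcases h with h | h <;> subst h <;>
  · cases r with
    | nil => by_cases h' : c' = 'F' <;> simp [altG, altLoop, h']
    | cons d s =>
      by_cases h' : c' = 'F'
      · subst h'; simp [altG, altLoop, List.dropLast]
      · simp [altG, altLoop, List.dropLast, h']

lemma altG_cons_bad (c c' : Char) (r : List Char)
    (hD : c ≠ 'D') (hE : c ≠ 'E') (hF : c ≠ 'F') :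
    altG (c :: c' :: r) = false := by
  simp [altG, altLoop, List.dropLast, hD, hE, hF]

-- the state machine's states 1 and 2, characterised by B's local predicate
lemma checkGo_QR : ∀ (rest : List Char),
    (∀ c, checkGo rest c 1 = yn ((c == 'F') && altG rest)) ∧
    (∀ c, checkGo rest c 2 = yn (altG (c :: rest))) := by
  intro rest
  induction rest with
  | nil =>
    constructor
    · intro c
      have : altG [] = false := by simp [altG, altLoop]
      simp [checkGo1_nil, yn, this]
    · intro c
      by_cases h : c = 'G' <;> simp [checkGo2_nil, yn, h, altG_single]
  | cons c' r ih =>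
    obtain ⟨ih1, ih2⟩ := ih
    constructor
    · intro c
      rw [checkGo1_cons]
      by_cases h : c = 'F'
      · subst h; simp [ih2, yn]
      · simp [yn, h]
    · intro c
      by_cases hDE : c = 'D' ∨ c = 'E'
      · rw [checkGo2_DE c c' r hDE, ih1, altG_cons_DE c c' r hDE]
        by_cases h' : c' = 'F'
        · subst h'; rw [altG_cons_F]
        · have : (c' == 'F') = false := by simp [h']
          rw [this, Bool.false_and, Bool.false_and]
      · rw [not_or] at hDE
        by_cases hF : c = 'F'
        · subst hF; rw [checkGo2_F, ih2, altG_cons_F]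
        · rw [checkGo2_bad _ _ _ hDE.1 hDE.2 hF]
          simp [altG_cons_bad _ c' r hDE.1 hDE.2 hF, yn]

lemma checkGo_zero (rest : List Char) (c : Char) (hDE : c = 'D' ∨ c = 'E') :
    checkGo rest c 0 = yn (altG (c :: rest)) := by
  cases rest with
  | nil =>
    have : altG [c] = false := by
      rcases hDE with h | h <;> subst h <;> decide
    simp [checkGo0_nil, yn, this]
  | cons c' r =>
    rw [checkGo0_cons, if_pos hDE, (checkGo_QR r).1, altG_cons_DE c c' r hDE]
    by_cases h' : c' = 'F'
    · subst h'; rw [altG_cons_F]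
    · have : (c' == 'F') = false := by simp [h']
      rw [this, Bool.false_and, Bool.false_and]

-- ===== VERDICT (by name: the statement is the Claim_ definition above) =====
theorem check_spec : Claim_equal_check := by
  intro str _ hpre
  unfold Spec_check
  rcases hl : str.toList with _ | ⟨c, rest⟩
  · exact absurd (by rwa [← str.toList_eq_nil_iff]) hpre
  · simp only [check, check_alt, hl]
    by_cases hDE : c = 'D' ∨ c = 'E'
    · rw [checkGo_zero rest c hDE, if_neg (not_not_intro hDE)]
      by_cases hG : (c :: rest).getLast? = some 'G'
      · rw [if_neg (by simpa using hG)]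
        by_cases hA : altLoop (c :: rest).dropLast = true
        · simp [yn, altG, hA, hG]
        · simp only [Bool.not_eq_true] at hA
          simp [yn, altG, hA]
      · rw [if_pos (by simpa using hG)]
        simp [yn, altG, hG]
    · rw [not_or] at hDE
      rw [if_pos (by simp [hDE.1, hDE.2])]
      cases rest with
      | nil => simp [checkGo0_nil]
      | cons c' r => rw [checkGo0_cons, if_neg (by simp [hDE.1, hDE.2])]
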